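-- pv_equiv track=rewrite | github.com/ondiiik/meteoink | simulator/uqr.py | _lost_point_level3
-- ===== SOURCE A (Python) =====
-- def _lost_point_level3(modules, modules_count):
--     # 1 : 1 : 3 : 1 : 1 ratio (dark:light:dark:light:dark) pattern in
--     # row/column, preceded or followed by light area 4 modules wide. From ISOIEC.
--     # pattern1:     10111010000
--     # pattern2: 00001011101
--     modules_range = range(modules_count)
--     modules_range_short = range(modules_count-10)
--     lost_point = 0
--
--     for row in modules_range:
--         this_row = modules[row]
--         modules_range_short_iter = iter(modules_range_short)
--         col = 0
--         for col in modules_range_short_iter: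
--             if (
--                         not this_row[col + 1]
--                     and this_row[col + 4]
--                     and not this_row[col + 5]
--                     and this_row[col + 6]
--                     and not this_row[col + 9]
--                 and (
--                         this_row[col + 0]
--                     and this_row[col + 2]
--                     and this_row[col + 3]
--                     and not this_row[col + 7]
--                     and not this_row[col + 8]
--                     and not this_row[col + 10]
--                 or
--                         not this_row[col + 0]
--                     and not this_row[col + 2]
--                     and not this_row[col + 3]
--                     and this_row[col + 7]
--                     and this_row[col + 8]
--                     and this_row[col + 10]
--                     )
--                 ):
--                 lost_point += 40
-- # horspool algorithm.
-- # if this_row[col + 10] == True,  pattern1 shift 4, pattern2 shift 2. So min=2.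
-- # if this_row[col + 10] == False, pattern1 shift 1, pattern2 shift 1. So min=1.
--             if this_row[col + 10]:
--                 try:
--                     next(modules_range_short_iter)
--                 except StopIteration:
--                     pass
--
--     for col in modules_range:
--         modules_range_short_iter = iter(modules_range_short)
--         row = 0
--         for row in modules_range_short_iter:
--             if (
--                         not modules[row + 1][col]
--                     and modules[row + 4][col]
--                     and not modules[row + 5][col]
--                     and modules[row + 6][col]
--                     and not modules[row + 9][col]
--                 and (
--                         modules[row + 0][col]
--                     and modules[row + 2][col]
--                     and modules[row + 3][col]
--                     and not modules[row + 7][col]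
--                     and not modules[row + 8][col]
--                     and not modules[row + 10][col]
--                 or
--                         not modules[row + 0][col]
--                     and not modules[row + 2][col]
--                     and not modules[row + 3][col]
--                     and modules[row + 7][col]
--                     and modules[row + 8][col]
--                     and modules[row + 10][col]
--                     )
--                 ):
--                 lost_point += 40
--             if modules[row + 10][col]:
--                 try:
--                     next(modules_range_short_iter)
--                 except StopIteration:
--                     pass
--
--     return lost_point
-- ===== SOURCE B (Python) =====
-- PAT1 = (True, False, True, True, True, False, True, False, False, False, False)
-- PAT2 = (False, False, False, False, True, False, True, True, True, False, True)
--
--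
-- def _lost_point_level3(modules, modules_count):
--     lost_point = 0
--     for row in range(modules_count):
--         this_row = modules[row]
--         for col in range(modules_count - 10):
--             w = tuple(bool(this_row[col + i]) for i in range(11))
--             if w == PAT1 or w == PAT2:
--                 lost_point += 40
--     for col in range(modules_count):
--         for row in range(modules_count - 10):
--             w = tuple(bool(modules[row + i][col]) for i in range(11))
--             if w == PAT1 or w == PAT2:
--                 lost_point += 40
--     return lost_point
-- ===== Notes on version B (the rewrite author's own statement) =====
-- stated objective: simpler
-- what changed: B drops A's Horspool skip and hand-fused 22-term boolean condition, instead scanning every window position and comparing the 11-cell window tuple against the two precomputed target patterns.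
import Mathlib
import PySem

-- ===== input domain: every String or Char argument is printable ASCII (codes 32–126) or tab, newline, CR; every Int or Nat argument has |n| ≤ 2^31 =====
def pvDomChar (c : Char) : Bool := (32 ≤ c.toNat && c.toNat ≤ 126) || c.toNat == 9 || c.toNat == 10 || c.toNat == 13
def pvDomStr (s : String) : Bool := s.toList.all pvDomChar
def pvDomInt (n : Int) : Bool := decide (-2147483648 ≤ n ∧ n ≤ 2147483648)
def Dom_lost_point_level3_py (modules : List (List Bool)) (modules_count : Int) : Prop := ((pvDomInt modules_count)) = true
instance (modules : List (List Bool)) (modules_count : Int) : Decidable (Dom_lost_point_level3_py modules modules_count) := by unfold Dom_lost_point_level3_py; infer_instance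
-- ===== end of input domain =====

-- B replaces A's hand-fused boolean condition + Horspool skip with a plain scan comparing each
-- 11-module window against the two target patterns (objective: simpler; not faster).

-- ===== PORT A =====
-- A's big fused condition, in Python's evaluation order (cells read via pyGetD; Pre_ keeps indices in range).
def pvMatchA (g : Int → Bool) (c : Int) : Bool :=
  (!g (c + 1)) && g (c + 4) && (!g (c + 5)) && g (c + 6) && (!g (c + 9)) &&
    ((g (c + 0) && g (c + 2) && g (c + 3) && !g (c + 7) && !g (c + 8) && !g (c + 10)) ||
     (!g (c + 0) && !g (c + 2) && !g (c + 3) && g (c + 7) && g (c + 8) && g (c + 10)))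

-- A's inner 'for col in modules_range_short_iter' loop: the list is the remaining iterator;
-- 'next(...)' on a hit of modules[...+10] drops one further index (StopIteration swallowed = tail of []).
def pvSkipLoop (g : Int → Bool) : List Int → Int → Int
  | [], acc => acc
  | c :: rest, acc =>
    let acc' := if pvMatchA g c then acc + 40 else acc
    if g (c + 10) then pvSkipLoop g rest.tail acc' else pvSkipLoop g rest acc'
  termination_by L _ => L.length
  decreasing_by
    · simp only [List.length_cons, List.length_tail]; omega
    · simp

def lost_point_level3_py (modules : List (List Bool)) (modules_count : Int) : Int :=
  let modules_range := PySem.List.pyRange 0 modules_count 1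
  let modules_range_short := PySem.List.pyRange 0 (modules_count - 10) 1
  let lp1 := modules_range.foldl (fun lost_point row =>
    let this_row := PySem.List.pyGetD modules row []
    pvSkipLoop (fun i => PySem.List.pyGetD this_row i false) modules_range_short lost_point) 0
  modules_range.foldl (fun lost_point col =>
    pvSkipLoop (fun i => PySem.List.pyGetD (PySem.List.pyGetD modules i []) col false)
      modules_range_short lost_point) lp1

-- ===== PORT B =====
def pvPat1 : List Bool := [true, false, true, true, true, false, true, false, false, false, false]
def pvPat2 : List Bool := [false, false, false, false, true, false, true, true, true, false, true]

-- the 11-cell window tuple(r[c+i] for i in range(11))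
def pvWindow (g : Int → Bool) (c : Int) : List Bool :=
  (PySem.List.pyRange 0 11 1).map (fun i => g (c + i))

def pvScanLoop (g : Int → Bool) (L : List Int) (acc : Int) : Int :=
  L.foldl (fun lost c =>
    if pvWindow g c = pvPat1 ∨ pvWindow g c = pvPat2 then lost + 40 else lost) acc

def lost_point_level3_py_alt (modules : List (List Bool)) (modules_count : Int) : Int :=
  let modules_range := PySem.List.pyRange 0 modules_count 1
  let modules_range_short := PySem.List.pyRange 0 (modules_count - 10) 1
  let lp1 := modules_range.foldl (fun lost_point row =>
    let this_row := PySem.List.pyGetD modules row []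
    pvScanLoop (fun i => PySem.List.pyGetD this_row i false) modules_range_short lost_point) 0
  modules_range.foldl (fun lost_point col =>
    pvScanLoop (fun i => PySem.List.pyGetD (PySem.List.pyGetD modules i []) col false)
      modules_range_short lost_point) lp1

-- ===== PRECONDITION & SPEC =====
-- Python A raises IndexError when the grid is smaller than modules_count says; Pre_ demands a full
-- modules_count×modules_count prefix (for modules_count ≥ 11 this is marginally stronger than the exact
-- raise set, which depends on `and`-short-circuiting skipping some cell reads on short rows).
def Pre_lost_point_level3_py (modules : List (List Bool)) (modules_count : Int) : Prop :=
  modules_count ≤ modules.length ∧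
    (11 ≤ modules_count → ∀ r ∈ modules.take modules_count.toNat, modules_count ≤ (r.length : Int))
instance (modules : List (List Bool)) (modules_count : Int) : Decidable (Pre_lost_point_level3_py modules modules_count) := by unfold Pre_lost_point_level3_py; infer_instance
def pvWitness_lost_point_level3_py : List (List Bool) × Int := ([[true], [false]], 2)

def Spec_lost_point_level3_py (modules : List (List Bool)) (modules_count : Int) (out : Int) : Prop := out = lost_point_level3_py_alt modules modules_count
instance (modules : List (List Bool)) (modules_count : Int) (out : Int) : Decidable (Spec_lost_point_level3_py modules modules_count out) := by unfold Spec_lost_point_level3_py; infer_instance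

-- ===== CLAIM (what is proved, stated in full; the proofs are below) =====
def Claim_equal_lost_point_level3_py : Prop := ∀ (modules : List (List Bool)) (modules_count : Int), Dom_lost_point_level3_py modules modules_count → Pre_lost_point_level3_py modules modules_count → Spec_lost_point_level3_py modules modules_count (lost_point_level3_py modules modules_count)

-- ===== LEMMAS AND PROOFS =====

-- the window expanded to its eleven cells
theorem pvWindow_eq (g : Int → Bool) (c : Int) :
    pvWindow g c = [g (c+0), g (c+1), g (c+2), g (c+3), g (c+4), g (c+5), g (c+6), g (c+7),
      g (c+8), g (c+9), g (c+10)] := rfl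

-- A's fused condition is exactly 'window = pattern1 or window = pattern2'
theorem pvMatch_iff (g : Int → Bool) (c : Int) :
    (pvWindow g c = pvPat1 ∨ pvWindow g c = pvPat2) ↔ pvMatchA g c = true := by
  rw [pvWindow_eq]
  have h : ∀ a0 a1 a2 a3 a4 a5 a6 a7 a8 a9 a10 : Bool,
      ([a0,a1,a2,a3,a4,a5,a6,a7,a8,a9,a10] = pvPat1 ∨ [a0,a1,a2,a3,a4,a5,a6,a7,a8,a9,a10] = pvPat2) ↔
      ((!a1) && a4 && (!a5) && a6 && (!a9) &&
        ((a0 && a2 && a3 && !a7 && !a8 && !a10) ||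
         (!a0 && !a2 && !a3 && a7 && a8 && a10))) = true := by decide
  exact h _ _ _ _ _ _ _ _ _ _ _

-- B's counting step rewritten through A's condition
theorem pvStep_eq (g : Int → Bool) (c acc : Int) :
    (if pvWindow g c = pvPat1 ∨ pvWindow g c = pvPat2 then acc + 40 else acc) =
      (if pvMatchA g c then acc + 40 else acc) := by
  by_cases h : pvMatchA g c = true
  · rw [if_pos h, if_pos ((pvMatch_iff g c).mpr h)]
  · rw [if_neg h, if_neg (fun hw => h ((pvMatch_iff g c).mp hw))]

-- the position skipped by the Horspool step can never match: its offset-9 cell is dark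
theorem pvMatchA_after (g : Int → Bool) (c : Int) (h : g (c + 10) = true) :
    pvMatchA g (c + 1) = false := by
  simp [pvMatchA, show c + 1 + 9 = c + 10 from by ring, h]

def pvConsec : List Int → Prop := List.IsChain (fun a b => b = a + 1)

theorem pvSkipLoop_eq_scan (g : Int → Bool) :
    ∀ (L : List Int) (acc : Int), pvConsec L → pvSkipLoop g L acc = pvScanLoop g L acc
  | [], acc, _ => by simp [pvSkipLoop, pvScanLoop]
  | [c], acc, _ => by
    rw [pvSkipLoop]
    simp only [pvScanLoop, List.foldl, List.tail, pvStep_eq]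
    split_ifs <;> simp [pvSkipLoop]
  | c :: d :: rest, acc, hch => by
    have hd : d = c + 1 := (List.isChain_cons_cons.mp hch).1
    have hrest2 : pvConsec (d :: rest) := (List.isChain_cons_cons.mp hch).2
    have hrest : pvConsec rest := hrest2.tail
    conv_lhs => rw [pvSkipLoop]
    simp only [List.tail]
    by_cases hg : g (c + 10) = true
    · rw [if_pos hg, pvSkipLoop_eq_scan g rest _ hrest]
      simp only [pvScanLoop, List.foldl, pvStep_eq]
      subst hd
      rw [pvMatchA_after g c hg]
      simp
    · rw [if_neg hg, pvSkipLoop_eq_scan g (d :: rest) _ hrest2]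
      simp only [pvScanLoop, List.foldl, pvStep_eq]
  termination_by L _ _ => L.length

theorem pvConsec_pyRange (a b : Int) : pvConsec (PySem.List.pyRange a b 1) := by
  unfold pvConsec
  generalize hn : (b - a).toNat = n
  induction n generalizing a with
  | zero =>
    rw [PySem.List.pyRange_one_eq_nil (by omega)]
    exact List.isChain_nil
  | succ n ih =>
    rw [PySem.List.pyRange_one_cons (by omega)]
    refine List.isChain_cons.mpr ⟨?_, ih (a + 1) (by omega)⟩
    intro y hy
    by_cases hb : a + 1 < b
    · rw [PySem.List.pyRange_one_cons hb] at hy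
      simp at hy
      omega
    · rw [PySem.List.pyRange_one_eq_nil (by omega)] at hy
      simp at hy

-- ===== VERDICT (by name: the statement is the Claim_ definition above) =====
theorem lost_point_level3_py_spec : Claim_equal_lost_point_level3_py := by
  intro modules mc _ _
  unfold Spec_lost_point_level3_py lost_point_level3_py lost_point_level3_py_alt
  have hfun : ∀ g : Int → Bool, ∀ acc : Int,
      pvSkipLoop g (PySem.List.pyRange 0 (mc - 10) 1) acc =
        pvScanLoop g (PySem.List.pyRange 0 (mc - 10) 1) acc := by
    intro g acc; exact pvSkipLoop_eq_scan g _ _ (pvConsec_pyRange _ _)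
  simp only [hfun]
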